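-- pv_equiv track=rewrite | github.com/abhidhakal/DSACoursework | ques3a.py | friend_requests_bfs
-- ===== SOURCE A (Python) =====
-- from collections import deque
--
-- def can_be_friends(graph, restrictions, houseA, houseB):
--     # Check if there is a path from houseA to any restricted pair involving houseB
--     for restrictedHouseA, restrictedHouseB in restrictions:
--         if (houseA == restrictedHouseA and houseB == restrictedHouseB) or (houseA == restrictedHouseB and houseB == restrictedHouseA):
--             return False
--
--         # BFS from restrictedHouseA to see if we can reach restrictedHouseB through houseA-houseB connection
--         queue = deque([restrictedHouseA])
--         visited = set()
--         while queue:
--             node = queue.popleft()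
--             if node in visited:
--                 continue
--             visited.add(node)
--             if node == restrictedHouseB:
--                 return False
--             for neighbor in graph[node]:
--                 queue.append(neighbor)
--     return True
--
-- def friend_requests_bfs(num_houses, restrictions, requests):
--     graph = {i: [] for i in range(num_houses)}
--     result = []
--
--     for houseA, houseB in requests:
--         if can_be_friends(graph, restrictions, houseA, houseB):
--             graph[houseA].append(houseB)
--             graph[houseB].append(houseA)
--             result.append("approved")
--         else:
--             result.append("denied")
--
--     return result
-- ===== SOURCE B (Python) =====
-- # Lazy union-find instead of per-restriction BFS: houses start as implicit singleton
-- # components (comp holds only relabelled ones), a restriction check is two O(1)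
-- # lookups and an approved request merges two components with one relabelling pass.
-- def friend_requests_bfs(num_houses, restrictions, requests):
--     comp = {}
--     result = []
--     for a, b in requests:
--         denied = any(
--             (a == x and b == y) or (a == y and b == x) or comp.get(x, x) == comp.get(y, y)
--             for x, y in restrictions
--         )
--         if denied:
--             result.append("denied")
--         else:
--             ca, cb = comp.get(a, a), comp.get(b, b)
--             if ca != cb:
--                 comp = {k: (ca if c == cb else c) for k, c in comp.items()}
--                 comp[cb] = ca
--             result.append("approved")
--     return result
-- ===== Notes on version B (the rewrite author's own statement) =====
-- stated objective: faster
-- what changed: Replaces the per-request per-restriction BFS over a growing adjacency dict by a lazy union-find: houses are implicit singleton components, a restriction check is two O(1) table lookups and an approved request merges two components with one relabelling pass; Pre_ excludes the inputs whose house lookups step outside range(num_houses), where A raises KeyError except when an earlier connected restriction happens to stop the scan first.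
-- outside the precondition, e.g. on friend_requests_bfs(2, [], [(0, 5)]): A raises KeyError, B returns ['approved']
import Mathlib
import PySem

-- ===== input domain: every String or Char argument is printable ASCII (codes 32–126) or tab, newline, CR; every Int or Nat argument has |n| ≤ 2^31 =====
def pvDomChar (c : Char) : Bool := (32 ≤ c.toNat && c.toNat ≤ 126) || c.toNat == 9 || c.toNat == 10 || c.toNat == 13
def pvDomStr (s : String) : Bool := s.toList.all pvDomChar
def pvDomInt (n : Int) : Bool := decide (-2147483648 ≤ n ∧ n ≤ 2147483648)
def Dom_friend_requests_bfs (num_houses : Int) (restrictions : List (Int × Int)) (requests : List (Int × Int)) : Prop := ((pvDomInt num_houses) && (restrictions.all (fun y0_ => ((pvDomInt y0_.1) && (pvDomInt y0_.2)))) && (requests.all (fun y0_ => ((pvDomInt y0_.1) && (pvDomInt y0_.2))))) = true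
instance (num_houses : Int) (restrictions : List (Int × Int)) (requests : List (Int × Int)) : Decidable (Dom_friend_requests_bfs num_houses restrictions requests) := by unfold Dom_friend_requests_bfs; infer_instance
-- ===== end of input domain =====

-- B replaces A's per-request per-restriction BFS by a lazy union-find: houses start as
-- implicit singleton components, a restriction check is two O(1) lookups and an approved
-- request merges two components with one relabelling pass.

-- ===== PORT A =====
-- the 'while queue' BFS of can_be_friends; none = KeyError (graph[node] on a missing key)
def pvBfsLoop (g : PySem.Dict Int (List Int)) (tgt : Int) (queue : List Int) (visited : PySem.Set Int) : Option Bool :=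
  match queue with
  | [] => some false
  | node :: rest =>
    if node ∈ visited then pvBfsLoop g tgt rest visited
    else
      -- visited.add(node); if node == restrictedHouseB: return False
      let visited' := PySem.Set.add visited node
      if node = tgt then some true
      else
        match hg : g.get? node with
        | none => none
        | some nbrs => pvBfsLoop g tgt (rest ++ nbrs) visited'
  termination_by ((g.keys.toFinset.filter (fun k => k ∉ visited)).card, queue.length)
  decreasing_by
  · exact Prod.Lex.right _ (by simp)
  · apply Prod.Lex.left
    apply Finset.card_lt_card
    have hnodek : node ∈ g.keys := by
      have : (g.get? node).isSome := by rw [hg]; rfl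
      have hc := (PySem.Dict.get?_eq_none_iff_contains (d := g) (k := node))
      by_contra hnk
      have : g.contains node = false := by
        cases hcc : g.contains node
        · rfl
        · exact absurd ((PySem.Dict.contains_iff_mem_keys (d := g) (k := node)).mp hcc) hnk
      rw [hc.mpr this] at hg; cases hg
    constructor
    · intro k hk
      simp only [Finset.mem_filter, List.mem_toFinset] at hk ⊢
      exact ⟨hk.1, fun hmem => hk.2 ((PySem.Set.mem_add (s := visited) (x := node) (y := k)).mpr (Or.inl hmem))⟩
    · intro hsub
      have h1 : node ∈ g.keys.toFinset.filter (fun k => k ∉ PySem.Set.add visited node) := by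
        apply hsub
        simp only [Finset.mem_filter, List.mem_toFinset]
        exact ⟨hnodek, by assumption⟩
      simp only [Finset.mem_filter] at h1
      exact h1.2 ((PySem.Set.mem_add (s := visited) (x := node) (y := node)).mpr (Or.inr rfl))

-- can_be_friends: loop over restrictions; none = KeyError propagated from the BFS
def pvCanBeFriends (g : PySem.Dict Int (List Int)) (restrictions : List (Int × Int)) (a b : Int) : Option Bool :=
  match restrictions with
  | [] => some true
  | (x, y) :: rs =>
    if (a = x ∧ b = y) ∨ (a = y ∧ b = x) then some false
    else
      match pvBfsLoop g y [x] PySem.Set.empty with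
      | none => none
      | some true => some false
      | some false => pvCanBeFriends g rs a b

-- main loop of friend_requests_bfs; on KeyError (none / missing key) Python raises: excluded by Pre_
def pvLoopA (g : PySem.Dict Int (List Int)) (restrictions : List (Int × Int)) (requests : List (Int × Int)) (acc : List String) : List String :=
  match requests with
  | [] => acc.reverse
  | (a, b) :: rest =>
    match pvCanBeFriends g restrictions a b with
    | none => acc.reverse
    | some false => pvLoopA g restrictions rest ("denied" :: acc)
    | some true =>
      match g.get? a with
      | none => acc.reverse
      | some la =>
        let g1 := g.insert a (la ++ [b])
        match g1.get? b with
        | none => acc.reverse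
        | some lb =>
          pvLoopA (g1.insert b (lb ++ [a])) restrictions rest ("approved" :: acc)

-- {i: [] for i in range(num_houses)} — a comprehension over the distinct keys range(n)
-- is exactly this items list
def friend_requests_bfs (num_houses : Int) (restrictions : List (Int × Int)) (requests : List (Int × Int)) : List String :=
  pvLoopA (PySem.Dict.mk ((PySem.List.pyRange 0 num_houses 1).map (fun i => (i, ([] : List Int)))))
    restrictions requests []

-- ===== PORT B =====
-- the any(...) generator of B, short-circuiting like Python's any; comp.get(x, x) is getD
def pvCheckB (comp : PySem.Dict Int Int) (restrictions : List (Int × Int)) (a b : Int) : Bool :=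
  match restrictions with
  | [] => false
  | (x, y) :: rs =>
    if (a = x ∧ b = y) ∨ (a = y ∧ b = x) ∨ comp.getD x x = comp.getD y y then true
    else pvCheckB comp rs a b

-- the dict comprehension {k: (ca if c == cb else c) for k, c in comp.items()} —
-- a comprehension over comp's distinct keys is exactly this items list
def pvUnion (comp : PySem.Dict Int Int) (ca cb : Int) : PySem.Dict Int Int :=
  PySem.Dict.mk (comp.items.map (fun p => (p.1, if p.2 = cb then ca else p.2)))

def pvLoopB (comp : PySem.Dict Int Int) (restrictions : List (Int × Int)) (requests : List (Int × Int)) (acc : List String) : List String :=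
  match requests with
  | [] => acc.reverse
  | (a, b) :: rest =>
    if pvCheckB comp restrictions a b then pvLoopB comp restrictions rest ("denied" :: acc)
    else
      -- ca, cb = comp.get(a, a), comp.get(b, b); relabel cb's component, comp[cb] = ca
      pvLoopB (if comp.getD a a = comp.getD b b then comp
               else (pvUnion comp (comp.getD a a) (comp.getD b b)).insert (comp.getD b b) (comp.getD a a))
        restrictions rest ("approved" :: acc)

-- comp = {}: the lazy table starts empty
def friend_requests_bfs_alt (num_houses : Int) (restrictions : List (Int × Int)) (requests : List (Int × Int)) : List String :=
  pvLoopB PySem.Dict.empty restrictions requests []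

-- ===== PRECONDITION & SPEC =====
-- pvDen a b p: restriction p stops request (a, b)'s scan regardless of the graph
-- (a direct pair match, or a degenerate pair x == y whose BFS succeeds at once)
def pvDen (a b : Int) (p : Int × Int) : Bool :=
  (a == p.1 && b == p.2) || (a == p.2 && b == p.1) || p.1 == p.2

-- Pre_ excludes exactly the inputs on which A's house lookups step outside range(num_houses):
-- for each request, every restriction scanned before the first unconditional stop pvDen must
-- have its BFS start in range, and a request no restriction unconditionally stops must have
-- both endpoints in range (A raises KeyError there except when an earlier restricted pair is
-- already connected, an order-of-checks accident; B's lazy table never raises).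
def Pre_friend_requests_bfs (num_houses : Int) (restrictions : List (Int × Int)) (requests : List (Int × Int)) : Prop :=
  ∀ q ∈ requests,
    (∀ p ∈ restrictions.takeWhile (fun p => !pvDen q.1 q.2 p), 0 ≤ p.1 ∧ p.1 < num_houses) ∧
    ((∀ p ∈ restrictions, pvDen q.1 q.2 p = false) →
      (0 ≤ q.1 ∧ q.1 < num_houses ∧ 0 ≤ q.2 ∧ q.2 < num_houses))
instance (num_houses : Int) (restrictions : List (Int × Int)) (requests : List (Int × Int)) : Decidable (Pre_friend_requests_bfs num_houses restrictions requests) := by unfold Pre_friend_requests_bfs; infer_instance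

def pvWitness_friend_requests_bfs : Int × (List (Int × Int)) × (List (Int × Int)) :=
  (3, [(0, 2)], [(0, 1), (1, 2), (2, 0)])

def Spec_friend_requests_bfs (num_houses : Int) (restrictions : List (Int × Int)) (requests : List (Int × Int)) (out : List String) : Prop := out = friend_requests_bfs_alt num_houses restrictions requests
instance (num_houses : Int) (restrictions : List (Int × Int)) (requests : List (Int × Int)) (out : List String) : Decidable (Spec_friend_requests_bfs num_houses restrictions requests out) := by unfold Spec_friend_requests_bfs; infer_instance

-- ===== CLAIM (what is proved, stated in full; the proofs are below) =====
def Claim_equal_friend_requests_bfs : Prop := ∀ (num_houses : Int) (restrictions : List (Int × Int)) (requests : List (Int × Int)), Dom_friend_requests_bfs num_houses restrictions requests → Pre_friend_requests_bfs num_houses restrictions requests → Spec_friend_requests_bfs num_houses restrictions requests (friend_requests_bfs num_houses restrictions requests)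

-- ===== LEMMAS AND PROOFS =====

-- undirected adjacency as A's dict stores it (empty for non-keys), and reachability

def pvAdj (g : PySem.Dict Int (List Int)) (u v : Int) : Prop := v ∈ g.getD u []
def pvReach (g : PySem.Dict Int (List Int)) : Int → Int → Prop := Relation.ReflTransGen (pvAdj g)

-- the shape A's graph always has: keys are exactly 0..n-1, neighbours in range, edges symmetric
def pvGood (n : Int) (g : PySem.Dict Int (List Int)) : Prop :=
  (∀ u : Int, (0 ≤ u ∧ u < n) ↔ (g.get? u).isSome) ∧
  (∀ u : Int, ∀ l, g.get? u = some l → ∀ v ∈ l, 0 ≤ v ∧ v < n) ∧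
  (∀ u v : Int, pvAdj g u v → pvAdj g v u)

lemma pvReach_closed (g : PySem.Dict Int (List Int)) (S : Int → Prop)
    (hS : ∀ v w, S v → pvAdj g v w → S w) {u t : Int} (hu : S u) (h : pvReach g u t) : S t := by
  induction h with
  | refl => exact hu
  | tail _ hstep ih => exact hS _ _ ih hstep

-- BFS correctness: under the loop invariants the BFS answers reachability
lemma pvBfs_correct (g : PySem.Dict Int (List Int)) (tgt : Int) :
    ∀ queue visited,
      (∀ u ∈ queue, (g.get? u).isSome) →
      (∀ u l, g.get? u = some l → ∀ v ∈ l, (g.get? v).isSome) →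
      (∀ v ∈ visited, ∀ w, pvAdj g v w → w ∈ visited ∨ w ∈ queue) →
      tgt ∉ visited →
      ∃ r, pvBfsLoop g tgt queue visited = some r ∧
        (r = true ↔ ∃ u, (u ∈ queue ∨ u ∈ visited) ∧ pvReach g u tgt) := by
  intro queue visited
  fun_induction pvBfsLoop g tgt queue visited with
  | case1 visited =>
    intro _ _ h3 h4
    refine ⟨false, rfl, ⟨fun h => by simp at h, ?_⟩⟩
    rintro ⟨u, hu, hrch⟩
    exfalso
    have hu' : u ∈ visited := by
      rcases hu with h | h
      · simp at h
      · exact h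
    have hcl : ∀ v w, v ∈ visited → pvAdj g v w → w ∈ visited := by
      intro v w hv hadj
      rcases h3 v hv w hadj with h | h
      · exact h
      · simp at h
    exact h4 (pvReach_closed g (fun z => z ∈ visited) hcl hu' hrch)
  | case2 visited node rest hv ih =>
    intro h1 h2 h3 h4
    obtain ⟨r, hr, hiff⟩ := ih (fun u hu => h1 u (List.mem_cons_of_mem _ hu)) h2
      (fun v hvv w hw => by
        rcases h3 v hvv w hw with h | h
        · exact Or.inl h
        · rcases List.mem_cons.mp h with h' | h'
          · exact Or.inl (h' ▸ hv)
          · exact Or.inr h') h4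
    refine ⟨r, hr, hiff.trans ⟨?_, ?_⟩⟩
    · rintro ⟨u, hu, hrch⟩
      refine ⟨u, ?_, hrch⟩
      rcases hu with h | h
      · exact Or.inl (List.mem_cons_of_mem _ h)
      · exact Or.inr h
    · rintro ⟨u, hu, hrch⟩
      refine ⟨u, ?_, hrch⟩
      rcases hu with h | h
      · rcases List.mem_cons.mp h with h' | h'
        · exact Or.inr (h' ▸ hv)
        · exact Or.inl h'
      · exact Or.inr h
  | case3 visited rest hne =>
    intro _ _ _ _
    exact ⟨true, rfl, ⟨fun _ => ⟨tgt, Or.inl (by simp), Relation.ReflTransGen.refl⟩, fun _ => rfl⟩⟩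
  | case4 visited node rest hnv hne hg =>
    intro h1 _ _ _
    have := h1 node (by simp)
    rw [hg] at this
    simp at this
  | case5 visited node rest hnv visited' hne nbrs hg ih =>
    intro h1 h2 h3 h4
    have hgetD : g.getD node [] = nbrs := by simp [PySem.Dict.getD_eq_get?_getD, hg]
    have hmadd : ∀ z : Int, z ∈ visited' ↔ z ∈ visited ∨ z = node :=
      fun z => PySem.Set.mem_add (s := visited) (x := node) (y := z)
    have h1' : ∀ u ∈ rest ++ nbrs, (g.get? u).isSome := by
      intro u hu
      rcases List.mem_append.mp hu with h | h
      · exact h1 u (List.mem_cons_of_mem _ h)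
      · exact h2 node nbrs hg u h
    have h3' : ∀ v ∈ visited', ∀ w, pvAdj g v w → w ∈ visited' ∨ w ∈ rest ++ nbrs := by
      intro v hv' w hw
      rcases (hmadd v).mp hv' with hvv | hveq
      · rcases h3 v hvv w hw with h | h
        · exact Or.inl ((hmadd w).mpr (Or.inl h))
        · rcases List.mem_cons.mp h with h' | h'
          · exact Or.inl ((hmadd w).mpr (Or.inr h'))
          · exact Or.inr (List.mem_append_left _ h')
      · have : w ∈ nbrs := by
          rw [hveq] at hw
          unfold pvAdj at hw
          rwa [hgetD] at hw
        exact Or.inr (List.mem_append_right _ this)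
    have h4' : tgt ∉ visited' := by
      intro hc
      rcases (hmadd tgt).mp hc with h | h
      · exact h4 h
      · exact hne h.symm
    obtain ⟨r, hr, hiff⟩ := ih h1' h2 h3' h4'
    refine ⟨r, hr, hiff.trans ⟨?_, ?_⟩⟩
    · rintro ⟨u, hu, hrch⟩
      rcases hu with h | h
      · rcases List.mem_append.mp h with h' | h'
        · exact ⟨u, Or.inl (List.mem_cons_of_mem _ h'), hrch⟩
        · refine ⟨node, Or.inl (by simp), Relation.ReflTransGen.head ?_ hrch⟩
          show pvAdj g node u
          unfold pvAdj
          rw [hgetD]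
          exact h'
      · rcases (hmadd u).mp h with h' | h'
        · exact ⟨u, Or.inr h', hrch⟩
        · exact ⟨node, Or.inl (by simp), h' ▸ hrch⟩
    · rintro ⟨u, hu, hrch⟩
      rcases hu with h | h
      · rcases List.mem_cons.mp h with h' | h'
        · exact ⟨u, Or.inr ((hmadd u).mpr (Or.inr h')), hrch⟩
        · exact ⟨u, Or.inl (List.mem_append_left _ h'), hrch⟩
      · exact ⟨u, Or.inr ((hmadd u).mpr (Or.inl h)), hrch⟩

lemma pvBfs_single (g : PySem.Dict Int (List Int)) {n : Int} (hg : pvGood n g) {x : Int}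
    (hx : 0 ≤ x ∧ x < n) (y : Int) :
    ∃ r, pvBfsLoop g y [x] PySem.Set.empty = some r ∧ (r = true ↔ pvReach g x y) := by
  obtain ⟨r, hr, hiff⟩ := pvBfs_correct g y [x] PySem.Set.empty
    (by
      intro u hu
      simp only [List.mem_singleton] at hu
      exact hu ▸ (hg.1 x).mp hx)
    (by
      intro u l hl v hv
      exact (hg.1 v).mp (hg.2.1 u l hl v hv))
    (by intro v hv; simp [PySem.Set.empty] at hv)
    (by simp [PySem.Set.empty])
  refine ⟨r, hr, hiff.trans ⟨?_, ?_⟩⟩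
  · rintro ⟨u, hu, hrch⟩
    rcases hu with h | h
    · simp only [List.mem_singleton] at h
      exact h ▸ hrch
    · simp [PySem.Set.empty] at h
  · intro h
    exact ⟨x, Or.inl (by simp), h⟩

-- adding the double edge a-b: how reachability grows
lemma pvReach_insert_edge (g g' : PySem.Dict Int (List Int)) (a b : Int)
    (hadj : ∀ u v, pvAdj g' u v ↔ pvAdj g u v ∨ (u = a ∧ v = b) ∨ (u = b ∧ v = a))
    (hsym : ∀ u v, pvAdj g u v → pvAdj g v u) :
    ∀ u v, pvReach g' u v ↔
      pvReach g u v ∨ (pvReach g u a ∧ pvReach g b v) ∨ (pvReach g u b ∧ pvReach g a v) := by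
  have hRs : ∀ p q, pvReach g p q → pvReach g q p := by
    intro p q h
    exact Relation.ReflTransGen.symmetric (fun {x y} hxy => hsym x y hxy) h
  intro u v
  constructor
  · intro h
    induction h with
    | refl => exact Or.inl Relation.ReflTransGen.refl
    | tail hreach hstep ih =>
      rcases (hadj _ _).mp hstep with hstep' | ⟨hc, hd⟩ | ⟨hc, hd⟩
      · rcases ih with h1 | ⟨h1, h2⟩ | ⟨h1, h2⟩
        · exact Or.inl (h1.tail hstep')
        · exact Or.inr (Or.inl ⟨h1, h2.tail hstep'⟩)
        · exact Or.inr (Or.inr ⟨h1, h2.tail hstep'⟩)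
      · subst hc; subst hd
        rcases ih with h1 | ⟨h1, h2⟩ | ⟨h1, h2⟩
        · exact Or.inr (Or.inl ⟨h1, Relation.ReflTransGen.refl⟩)
        · exact Or.inl (h1.trans (hRs _ _ h2))
        · exact Or.inl h1
      · subst hc; subst hd
        rcases ih with h1 | ⟨h1, h2⟩ | ⟨h1, h2⟩
        · exact Or.inr (Or.inr ⟨h1, Relation.ReflTransGen.refl⟩)
        · exact Or.inl h1
        · exact Or.inl (h1.trans (hRs _ _ h2))
  · intro h
    have hmono : ∀ p q, pvReach g p q → pvReach g' p q :=
      fun p q hh => Relation.ReflTransGen.mono (fun x y hxy => (hadj x y).mpr (Or.inl hxy)) hh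
    have hab : pvReach g' a b :=
      Relation.ReflTransGen.single ((hadj a b).mpr (Or.inr (Or.inl ⟨rfl, rfl⟩)))
    have hba : pvReach g' b a :=
      Relation.ReflTransGen.single ((hadj b a).mpr (Or.inr (Or.inr ⟨rfl, rfl⟩)))
    rcases h with h1 | ⟨h1, h2⟩ | ⟨h1, h2⟩
    · exact hmono _ _ h1
    · exact ((hmono _ _ h1).trans hab).trans (hmono _ _ h2)
    · exact ((hmono _ _ h1).trans hba).trans (hmono _ _ h2)

-- the two inserts of A's approved branch change adjacency by exactly the pair of arcs
lemma pvAdj_after_insert (g : PySem.Dict Int (List Int)) (a b : Int) (la lb : List Int)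
    (hla : g.get? a = some la) (hlb : (g.insert a (la ++ [b])).get? b = some lb) :
    ∀ u v, pvAdj ((g.insert a (la ++ [b])).insert b (lb ++ [a])) u v ↔
      pvAdj g u v ∨ (u = a ∧ v = b) ∨ (u = b ∧ v = a) := by
  intro u v
  have hgla : g.getD a [] = la := by simp [PySem.Dict.getD_eq_get?_getD, hla]
  by_cases hba : b = a
  · subst hba
    have hlb' : lb = la ++ [b] := by
      have := hlb
      rw [PySem.Dict.get?_insert_self] at this
      exact (Option.some.injEq _ _ ▸ this.symm : _)
    simp only [pvAdj, PySem.Dict.getD_insert, hlb']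
    by_cases hub : u = b <;> simp [hub, hgla]
  · have hlb' : g.getD b [] = lb := by
      have hgb : g.get? b = some lb := by
        rw [PySem.Dict.get?_insert_of_ne _ _ hba] at hlb
        exact hlb
      simp [PySem.Dict.getD_eq_get?_getD, hgb]
    simp only [pvAdj, PySem.Dict.getD_insert]
    by_cases hub : u = b <;> by_cases hua : u = a <;>
      simp [hub, hua, hgla, hlb', hba, Ne.symm hba]

-- coupling invariant: the graph has its shape, labels are representative fixed points,
-- equal labels = reachable in A's graph (over ALL of Int: non-keys are singletons)
def pvInv (n : Int) (g : PySem.Dict Int (List Int)) (comp : PySem.Dict Int Int) : Prop :=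
  pvGood n g ∧
  (∀ u : Int, comp.getD (comp.getD u u) (comp.getD u u) = comp.getD u u) ∧
  (∀ u v : Int, comp.getD u u = comp.getD v v ↔ pvReach g u v)

lemma pvUnion_get? (comp : PySem.Dict Int Int) (ca cb u : Int) :
    (pvUnion comp ca cb).get? u = (comp.get? u).map (fun v => if v = cb then ca else v) := by
  unfold pvUnion
  simp only [PySem.Dict.get?]
  rw [List.find?_map]
  rw [show ((fun p : Int × Int => p.1 == u) ∘ (fun p : Int × Int => (p.1, if p.2 = cb then ca else p.2))) =
      (fun p : Int × Int => p.1 == u) from rfl]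
  cases List.find? (fun p : Int × Int => p.1 == u) comp.items <;> rfl

-- the merged table's lookup, pointwise: relabel cb to ca
lemma pvFind_union (comp : PySem.Dict Int Int) (ca cb : Int)
    (hcb : comp.getD cb cb = cb) (u : Int) :
    ((pvUnion comp ca cb).insert cb ca).getD u u =
      if comp.getD u u = cb then ca else comp.getD u u := by
  rw [PySem.Dict.getD_insert]
  by_cases hu : u = cb
  · subst hu
    rw [if_pos rfl, hcb, if_pos rfl]
  · rw [if_neg hu, PySem.Dict.getD_eq_get?_getD, pvUnion_get?]
    cases hc : comp.get? u with
    | none =>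
      have : comp.getD u u = u := by simp [PySem.Dict.getD_eq_get?_getD, hc]
      rw [this, if_neg hu]
      rfl
    | some c =>
      have : comp.getD u u = c := by simp [PySem.Dict.getD_eq_get?_getD, hc]
      rw [this]
      rfl

-- pvDen spelled out as the three stopping cases
lemma pvDen_eq_false_iff (a b : Int) (p : Int × Int) :
    pvDen a b p = false ↔ ¬((a = p.1 ∧ b = p.2) ∨ (a = p.2 ∧ b = p.1)) ∧ p.1 ≠ p.2 := by
  simp [pvDen]

-- checks agree under the invariant, given the Pre_ prefix condition for this request
lemma pvCheck_eq (n : Int) (g : PySem.Dict Int (List Int)) (comp : PySem.Dict Int Int)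
    (hInv : pvInv n g comp) (a b : Int) :
    ∀ restrictions,
      (∀ p ∈ restrictions.takeWhile (fun p => !pvDen a b p), 0 ≤ p.1 ∧ p.1 < n) →
      pvCanBeFriends g restrictions a b = some (!pvCheckB comp restrictions a b) := by
  obtain ⟨hg, hfix, hlbl⟩ := hInv
  intro restrictions
  induction restrictions with
  | nil => intro _; rfl
  | cons p rs ih =>
    intro hpre
    obtain ⟨x, y⟩ := p
    unfold pvCanBeFriends pvCheckB
    by_cases hpair : (a = x ∧ b = y) ∨ (a = y ∧ b = x)
    · rw [if_pos hpair,
        if_pos (show (a = x ∧ b = y) ∨ (a = y ∧ b = x) ∨ comp.getD x x = comp.getD y y by tauto)]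
      rfl
    · rw [if_neg hpair]
      by_cases hxy : x = y
      · subst hxy
        have hbfs : pvBfsLoop g x [x] PySem.Set.empty = some true := by
          rw [pvBfsLoop.eq_def]
          simp [PySem.Set.empty]
        rw [hbfs, if_pos (Or.inr (Or.inr rfl))]
        rfl
      · have hden : pvDen a b (x, y) = false := by
          rw [pvDen_eq_false_iff]
          exact ⟨hpair, hxy⟩
        have htw : ((x, y) :: rs).takeWhile (fun p => !pvDen a b p) =
            (x, y) :: rs.takeWhile (fun p => !pvDen a b p) := by
          rw [List.takeWhile_cons, if_pos (by simp [hden])]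
        rw [htw] at hpre
        have hx : 0 ≤ x ∧ x < n := by
          have := hpre (x, y) (by simp)
          exact this
        have hpre' : ∀ p ∈ rs.takeWhile (fun p => !pvDen a b p), 0 ≤ p.1 ∧ p.1 < n :=
          fun p hp => hpre p (List.mem_cons_of_mem _ hp)
        obtain ⟨r, hr, hiff⟩ := pvBfs_single g hg hx y
        rw [hr]
        have hlxy := hlbl x y
        cases r with
        | true =>
          rw [if_pos (Or.inr (Or.inr (hlxy.mpr (hiff.mp rfl))))]
          rfl
        | false =>
          have hne : comp.getD x x ≠ comp.getD y y := by
            intro he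
            exact absurd (hiff.mpr (hlxy.mp he)) (by simp)
          rw [if_neg (by tauto)]
          exact ih hpre'

-- a request B approves is stopped by no restriction unconditionally
lemma pvCheckB_false_den (comp : PySem.Dict Int Int) (a b : Int) :
    ∀ restrictions, pvCheckB comp restrictions a b = false →
      ∀ p ∈ restrictions, pvDen a b p = false := by
  intro restrictions
  induction restrictions with
  | nil => intro _ p hp; simp at hp
  | cons q rs ih =>
    intro h p hp
    obtain ⟨x, y⟩ := q
    simp only [pvCheckB] at h
    split_ifs at h with hcond
    · rcases List.mem_cons.mp hp with h' | h'
      · subst h'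
        rw [pvDen_eq_false_iff]
        refine ⟨fun hc => hcond ?_, fun hc => hcond (Or.inr (Or.inr (by rw [show x = y from hc])))⟩
        tauto
      · exact ih h p h'

-- the invariant is preserved by an approved request
lemma pvInv_step (n : Int) (g : PySem.Dict Int (List Int)) (comp : PySem.Dict Int Int)
    (hInv : pvInv n g comp) {a b : Int} (ha : 0 ≤ a ∧ a < n) (hb : 0 ≤ b ∧ b < n)
    (la lb : List Int) (hla : g.get? a = some la)
    (hlb : (g.insert a (la ++ [b])).get? b = some lb) :
    pvInv n ((g.insert a (la ++ [b])).insert b (lb ++ [a]))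
      (if comp.getD a a = comp.getD b b then comp
       else (pvUnion comp (comp.getD a a) (comp.getD b b)).insert (comp.getD b b) (comp.getD a a)) := by
  obtain ⟨⟨hkeys, hvals, hsym⟩, hfix, hlbl⟩ := hInv
  have hadj := pvAdj_after_insert g a b la lb hla hlb
  have hreach := pvReach_insert_edge g ((g.insert a (la ++ [b])).insert b (lb ++ [a])) a b hadj hsym
  have hsym2 : ∀ u v, pvAdj ((g.insert a (la ++ [b])).insert b (lb ++ [a])) u v →
      pvAdj ((g.insert a (la ++ [b])).insert b (lb ++ [a])) v u := by
    intro u v h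
    rcases (hadj u v).mp h with h' | ⟨h1, h2⟩ | ⟨h1, h2⟩
    · exact (hadj v u).mpr (Or.inl (hsym u v h'))
    · exact (hadj v u).mpr (Or.inr (Or.inr ⟨h2, h1⟩))
    · exact (hadj v u).mpr (Or.inr (Or.inl ⟨h2, h1⟩))
  have hkeys2 : ∀ u : Int, (0 ≤ u ∧ u < n) ↔
      ((((g.insert a (la ++ [b])).insert b (lb ++ [a])).get? u).isSome : Prop) := by
    intro u
    rw [PySem.Dict.get?_insert, PySem.Dict.get?_insert]
    split_ifs with h1 h2
    · subst h1; simpa using hb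
    · subst h2; simpa using ha
    · exact hkeys u
  have hlbmem : ∀ v ∈ lb, 0 ≤ v ∧ v < n := by
    by_cases hba : b = a
    · subst hba
      rw [PySem.Dict.get?_insert_self] at hlb
      rw [Option.some.injEq] at hlb
      intro v hv
      have : v ∈ la ++ [b] := by rw [hlb]; exact hv
      rcases List.mem_append.mp this with h | h
      · exact hvals b la hla v h
      · simp at h; exact h ▸ hb
    · have hgb : g.get? b = some lb := by
        rw [PySem.Dict.get?_insert_of_ne _ _ hba] at hlb
        exact hlb
      exact hvals b lb hgb
  have hvals2 : ∀ u l, ((g.insert a (la ++ [b])).insert b (lb ++ [a])).get? u = some l →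
      ∀ v ∈ l, 0 ≤ v ∧ v < n := by
    intro u l hl v hv
    rw [PySem.Dict.get?_insert, PySem.Dict.get?_insert] at hl
    split_ifs at hl with h1 h2
    · rw [Option.some.injEq] at hl
      subst hl
      rcases List.mem_append.mp hv with h | h
      · exact hlbmem v h
      · simp at h; exact h ▸ ha
    · rw [Option.some.injEq] at hl
      subst hl
      rcases List.mem_append.mp hv with h | h
      · exact hvals a la hla v h
      · simp at h; exact h ▸ hb
    · exact hvals u l hl v hv
  refine ⟨⟨hkeys2, hvals2, hsym2⟩, ?_, ?_⟩
  · -- labels stay representative fixed points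
    by_cases hc : comp.getD a a = comp.getD b b
    · rw [if_pos hc]; exact hfix
    · rw [if_neg hc]
      have hF := pvFind_union comp (comp.getD a a) (comp.getD b b) (hfix b)
      intro u
      rw [hF u]
      by_cases hu : comp.getD u u = comp.getD b b
      · rw [if_pos hu, hF (comp.getD a a), hfix a, if_neg hc]
      · rw [if_neg hu, hF (comp.getD u u), hfix u, if_neg hu]
  · -- equal labels = reachable in the grown graph
    intro u v
    rw [hreach u v, ← hlbl u v, ← hlbl u a, ← hlbl b v, ← hlbl u b, ← hlbl a v]
    by_cases hc : comp.getD a a = comp.getD b b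
    · simp only [if_pos hc]
      rw [hc]
      generalize comp.getD u u = fu
      generalize comp.getD v v = fv
      generalize comp.getD b b = cb
      constructor
      · exact Or.inl
      · rintro (h | ⟨h1, h2⟩ | ⟨h1, h2⟩) <;> omega
    · simp only [if_neg hc]
      have hF := pvFind_union comp (comp.getD a a) (comp.getD b b) (hfix b)
      rw [hF u, hF v]
      generalize comp.getD u u = fu
      generalize comp.getD v v = fv
      generalize hca : comp.getD a a = ca
      generalize hcb : comp.getD b b = cb
      rw [hca, hcb] at hc
      split_ifs <;> constructor <;> intro hh <;> omega

-- main coupled loop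
lemma pvLoop_eq (n : Int) (restrictions : List (Int × Int)) :
    ∀ requests,
      (∀ q ∈ requests,
        (∀ p ∈ restrictions.takeWhile (fun p => !pvDen q.1 q.2 p), 0 ≤ p.1 ∧ p.1 < n) ∧
        ((∀ p ∈ restrictions, pvDen q.1 q.2 p = false) →
          (0 ≤ q.1 ∧ q.1 < n ∧ 0 ≤ q.2 ∧ q.2 < n))) →
    ∀ g comp acc, pvInv n g comp →
      pvLoopA g restrictions requests acc = pvLoopB comp restrictions requests acc := by
  intro requests
  induction requests with
  | nil => intro _ g comp acc _; rfl
  | cons q rest ih =>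
    intro hQ g comp acc hInv
    obtain ⟨a, b⟩ := q
    have hq := hQ (a, b) (by simp)
    have hQr : ∀ q ∈ rest,
        (∀ p ∈ restrictions.takeWhile (fun p => !pvDen q.1 q.2 p), 0 ≤ p.1 ∧ p.1 < n) ∧
        ((∀ p ∈ restrictions, pvDen q.1 q.2 p = false) →
          (0 ≤ q.1 ∧ q.1 < n ∧ 0 ≤ q.2 ∧ q.2 < n)) :=
      fun q hq' => hQ q (List.mem_cons_of_mem _ hq')
    have hcheck := pvCheck_eq n g comp hInv a b restrictions hq.1
    cases hC : pvCheckB comp restrictions a b with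
    | true =>
      simp only [pvLoopA, pvLoopB, hcheck, hC, Bool.not_true, if_pos]
      exact ih hQr g comp _ hInv
    | false =>
      obtain ⟨ha0, ha1, hb0, hb1⟩ := hq.2 (pvCheckB_false_den comp a b restrictions hC)
      have hga : g.get? a = some (g.getD a []) := by
        have h := (hInv.1.1 a).mp ⟨ha0, ha1⟩
        cases hg' : g.get? a with
        | none => rw [hg'] at h; simp at h
        | some v => simp [PySem.Dict.getD_eq_get?_getD, hg']
      have hgb : ((g.insert a (g.getD a [] ++ [b])).get? b).isSome := by
        rw [PySem.Dict.get?_insert]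
        split_ifs with h1
        · rfl
        · exact (hInv.1.1 b).mp ⟨hb0, hb1⟩
      cases hgb' : (g.insert a (g.getD a [] ++ [b])).get? b with
      | none => rw [hgb'] at hgb; simp at hgb
      | some lb =>
        simp only [pvLoopA, pvLoopB, hcheck, hC, Bool.not_false, Bool.false_eq_true,
          hga, hgb']
        exact ih hQr _ _ _ (pvInv_step n g comp hInv ⟨ha0, ha1⟩ ⟨hb0, hb1⟩ _ lb hga hgb')

-- a dict comprehension over distinct int keys, looked up
lemma pvMkMap_get? {α : Type} (f : Int → α) (l : List Int) (u : Int) :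
    (PySem.Dict.mk (l.map (fun i => (i, f i)))).get? u = if u ∈ l then some (f u) else none := by
  induction l with
  | nil => simp [PySem.Dict.get?]
  | cons i l ih =>
    simp only [List.map_cons, PySem.Dict.get?_mk_cons]
    by_cases h : i = u
    · subst h; simp
    · simp only [ih, List.mem_cons]
      simp [h, Ne.symm h]

-- the initial state satisfies the invariant
lemma pvInv_init (n : Int) :
    pvInv n (PySem.Dict.mk ((PySem.List.pyRange 0 n 1).map (fun i => (i, ([] : List Int)))))
      PySem.Dict.empty := by
  have hmem : ∀ u : Int, u ∈ PySem.List.pyRange 0 n 1 ↔ 0 ≤ u ∧ u < n := by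
    intro u; exact PySem.List.mem_pyRange_one
  have hgetG : ∀ u : Int,
      (PySem.Dict.mk ((PySem.List.pyRange 0 n 1).map (fun i => (i, ([] : List Int))))).get? u =
      if 0 ≤ u ∧ u < n then some [] else none := by
    intro u
    rw [pvMkMap_get? (fun _ => ([] : List Int))]
    simp [hmem u]
  have hadj0 : ∀ u v : Int,
      ¬ pvAdj (PySem.Dict.mk ((PySem.List.pyRange 0 n 1).map (fun i => (i, ([] : List Int))))) u v := by
    intro u v h
    unfold pvAdj at h
    rw [PySem.Dict.getD_eq_get?_getD, hgetG u] at h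
    split_ifs at h <;> simp at h
  have hempty : ∀ u : Int, (PySem.Dict.empty : PySem.Dict Int Int).getD u u = u := by
    intro u
    simp [PySem.Dict.getD_empty]
  refine ⟨⟨?_, ?_, ?_⟩, ?_, ?_⟩
  · intro u
    rw [hgetG u]
    split_ifs with h <;> simp [h]
  · intro u l hl v hv
    rw [hgetG u] at hl
    split_ifs at hl with h
    rw [Option.some.injEq] at hl
    subst hl
    simp at hv
  · intro u v h
    exact absurd h (hadj0 u v)
  · intro u
    rw [hempty u, hempty u]
  · intro u v
    rw [hempty u, hempty v]
    constructor
    · intro h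
      exact h ▸ Relation.ReflTransGen.refl
    · intro h
      exact (pvReach_closed _ (fun z => z = u) (fun p q hp hq => absurd hq (hadj0 p q)) rfl h).symm

-- ===== VERDICT (by name: the statement is the Claim_ definition above) =====
theorem friend_requests_bfs_spec : Claim_equal_friend_requests_bfs := by
  intro n restrictions requests _ hpre
  unfold Spec_friend_requests_bfs friend_requests_bfs friend_requests_bfs_alt
  exact pvLoop_eq n restrictions requests hpre _ _ [] (pvInv_init n)
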